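-- pv_equiv track=rewrite | github.com/pepe-olivert/GA_competition | GA.py | transform_solution
-- ===== SOURCE A (Python) =====
-- def transform_solution(solution):
--     """
--     Function to encode a given solution in order to compute different crossovers and mutations.
--
--     :param solution: A given solution to translate.
--     :type solution: str
--
--     :return: The new solution.
--     :rtype: list
--     """
--     final = []
--     aux = []
--     for s in solution:
--         if s > 0:
--             aux.append(s)
--         else:
--             final.append(aux)
--             aux=[]
--     final.append(aux)
--     return final
-- ===== SOURCE B (Python) =====
-- def transform_solution(solution):
--     # One scan collects the indices of the separators (elements <= 0);
--     # the result is then assembled by slicing between consecutive separators.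
--     xs = list(solution)
--     seps = [i for i, s in enumerate(xs) if s <= 0]
--     out = []
--     prev = -1
--     for i in seps:
--         out.append(xs[prev + 1:i])
--         prev = i
--     out.append(xs[prev + 1:])
--     return out
-- ===== Notes on version B (the rewrite author's own statement) =====
-- stated objective: alternative
-- what changed: B first collects the indices of the separator elements (<= 0) and then assembles the result by slicing the list between consecutive separator indices, instead of A's single forward pass that grows an aux sublist and flushes it at each separator.
import Mathlib
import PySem

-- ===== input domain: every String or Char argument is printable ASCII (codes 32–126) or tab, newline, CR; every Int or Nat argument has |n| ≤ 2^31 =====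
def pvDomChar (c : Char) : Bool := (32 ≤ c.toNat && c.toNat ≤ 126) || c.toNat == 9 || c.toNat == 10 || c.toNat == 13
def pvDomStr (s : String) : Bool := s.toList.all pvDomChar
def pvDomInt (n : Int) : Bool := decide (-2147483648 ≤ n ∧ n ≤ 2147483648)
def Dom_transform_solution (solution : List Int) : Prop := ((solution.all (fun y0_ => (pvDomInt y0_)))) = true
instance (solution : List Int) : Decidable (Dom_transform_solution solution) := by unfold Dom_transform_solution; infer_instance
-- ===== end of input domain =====

-- B collects separator indices first and assembles the result by slicing, instead of A's forward aux-accumulator pass; alternative decomposition, same cost.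


-- ===== PORT A =====
-- loop body of A: append to aux while positive, flush aux into final at a non-positive element
def pvStepA (p : List (List Int) × List Int) (s : Int) : List (List Int) × List Int :=
  if s > 0 then (p.1, p.2 ++ [s]) else (p.1 ++ [p.2], [])

def transform_solution (solution : List Int) : List (List Int) :=
  let st := solution.foldl pvStepA ([], [])
  st.1 ++ [st.2]

-- ===== PORT B =====
-- seps = [i for i, s in enumerate(xs) if s <= 0]
def pvSeps (xs : List Int) : List Int :=
  ((PySem.List.enumerate xs).filter (fun p => decide (p.2 ≤ 0))).map (fun p => p.1)

-- loop body of B: out.append(xs[prev+1:i]); prev = i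
def pvStepB (xs : List Int) (p : List (List Int) × Int) (i : Int) : List (List Int) × Int :=
  (p.1 ++ [PySem.List.slice xs (some (p.2 + 1)) (some i)], i)

def transform_solution_alt (solution : List Int) : List (List Int) :=
  let st := (pvSeps solution).foldl (pvStepB solution) ([], -1)
  st.1 ++ [PySem.List.slice solution (some (st.2 + 1)) none]

-- ===== PRECONDITION & SPEC =====
def Spec_transform_solution (solution : List Int) (out : List (List Int)) : Prop := out = transform_solution_alt solution
instance (solution : List Int) (out : List (List Int)) : Decidable (Spec_transform_solution solution out) := by unfold Spec_transform_solution; infer_instance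

-- ===== CLAIM (what is proved, stated in full; the proofs are below) =====
def Claim_equal_transform_solution : Prop := ∀ (solution : List Int), Dom_transform_solution solution → Spec_transform_solution solution (transform_solution solution)

-- ===== LEMMAS AND PROOFS =====

-- a slice whose bounds stay inside xs is unchanged by appending on the right
theorem pv_slice_append (xs ys : List Int) (a b : Int) (ha : 0 ≤ a) (ha' : a ≤ (xs.length : Int))
    (hb : 0 ≤ b) (hb' : b ≤ (xs.length : Int)) :
    PySem.List.slice (xs ++ ys) (some a) (some b) = PySem.List.slice xs (some a) (some b) := by
  rw [PySem.List.slice_toNat _ ha hb, PySem.List.slice_toNat _ ha hb]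
  have h1 : a.toNat ≤ xs.length := by omega
  have h2 : b.toNat ≤ xs.length := by omega
  rw [List.drop_append_of_le_length h1, List.take_append_of_le_length (by simp; omega)]

-- xs[a:len xs] = xs.drop a for 0 ≤ a
theorem pv_slice_to_len (xs : List Int) (a : Int) (ha : 0 ≤ a) :
    PySem.List.slice xs (some a) (some (xs.length : Int)) = xs.drop a.toNat := by
  rw [PySem.List.slice_toNat _ ha (by positivity)]
  exact List.take_of_length_le (by simp)

theorem pv_seps_mem (xs : List Int) : ∀ i ∈ pvSeps xs, 0 ≤ i ∧ i < (xs.length : Int) := by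
  intro i hi
  simp only [pvSeps, List.mem_map, List.mem_filter] at hi
  obtain ⟨p, ⟨hp, -⟩, rfl⟩ := hi
  rw [PySem.List.mem_enumerate_iff] at hp
  obtain ⟨k, hk, rfl⟩ := hp
  constructor <;> simp [hk]

theorem pv_seps_append (xs : List Int) (x : Int) :
    pvSeps (xs ++ [x]) = pvSeps xs ++ (if x ≤ 0 then [(xs.length : Int)] else []) := by
  by_cases h : x ≤ 0 <;>
    simp [pvSeps, PySem.List.enumerate_append, PySem.List.enumerate_cons,
      PySem.List.enumerate_nil, List.filter_append, h]

-- folding B's loop body slices only inside xs, so appending on the right does not change it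
theorem pv_fold_congr (xs ys : List Int) (l : List Int)
    (hl : ∀ i ∈ l, 0 ≤ i ∧ i < (xs.length : Int)) :
    ∀ (acc : List (List Int)) (prev : Int), 0 ≤ prev + 1 → prev + 1 ≤ (xs.length : Int) →
      l.foldl (pvStepB (xs ++ ys)) (acc, prev) = l.foldl (pvStepB xs) (acc, prev) := by
  induction l with
  | nil => intros; rfl
  | cons i l ih =>
    intro acc prev h0 h1
    obtain ⟨hi0, hi1⟩ := hl i (List.mem_cons_self ..)
    simp only [List.foldl_cons, pvStepB]
    rw [pv_slice_append xs ys _ _ h0 h1 hi0 (by omega)]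
    exact ih (fun j hj => hl j (List.mem_cons_of_mem _ hj)) _ _ (by omega) (by omega)

-- the invariant tying A's fold state to B's fold state
theorem pv_main (xs : List Int) :
    (xs.foldl pvStepA ([], [])).1 = ((pvSeps xs).foldl (pvStepB xs) ([], -1)).1 ∧
    (xs.foldl pvStepA ([], [])).2 = xs.drop (((pvSeps xs).foldl (pvStepB xs) ([], -1)).2 + 1).toNat ∧
    -1 ≤ ((pvSeps xs).foldl (pvStepB xs) ([], -1)).2 ∧
    ((pvSeps xs).foldl (pvStepB xs) ([], -1)).2 + 1 ≤ (xs.length : Int) := by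
  induction xs using List.reverseRecOn with
  | nil => simp [pvSeps, PySem.List.enumerate_nil]
  | append_singleton xs x ih =>
    obtain ⟨ih1, ih2, ih3, ih4⟩ := ih
    have hcongr := pv_fold_congr xs [x] (pvSeps xs) (pv_seps_mem xs) [] (-1) (by omega) (by simp)
    rw [List.foldl_append]
    by_cases hx : x > 0
    · rw [pv_seps_append xs x, if_neg (by omega), List.append_nil, hcongr]
      refine ⟨by simpa [pvStepA, hx] using ih1, ?_, ih3, by simp; omega⟩
      have : (((pvSeps xs).foldl (pvStepB xs) ([], -1)).2 + 1).toNat ≤ xs.length := by omega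
      simp [pvStepA, hx, ih2, List.drop_append_of_le_length this]
    · rw [pv_seps_append xs x, if_pos (by omega), List.foldl_append, hcongr]
      simp only [List.foldl_cons, List.foldl_nil, pvStepB]
      set prev := ((pvSeps xs).foldl (pvStepB xs) ([], -1)).2 with hprev
      refine ⟨?_, ?_, by omega, by simp⟩
      · rw [pv_slice_append xs [x] _ _ (by omega) ih4 (by positivity) (le_refl _),
            pv_slice_to_len xs _ (by omega)]
        simp [pvStepA, hx, ih1, ih2]
      · simp [pvStepA, hx, List.drop_eq_nil_of_le]

-- ===== VERDICT (by name: the statement is the Claim_ definition above) =====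
theorem transform_solution_spec : Claim_equal_transform_solution := by
  intro solution _
  obtain ⟨h1, h2, h3, _⟩ := pv_main solution
  unfold Spec_transform_solution
  simp only [transform_solution, transform_solution_alt]
  rw [PySem.List.slice_from _ (by omega)]
  simp [h1, h2]
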